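-- pv_equiv track=rewrite | github.com/DaredevilSlim/Python | Checkio/Strings_theory/fibonacci_poem.py | fibo_poem
-- ===== SOURCE A (Python) =====
-- def fibo_poem(text: str) -> str:
--     text = list(map(str, text.split()))
--     a, b = 0, 1
--     d = []
--     new = ''
--     for i in range(len(text)):
--         if len(d) < b:
--             d.append(text[i])
--         else:
--             new += ' '.join(d)
--             b, a = a + b, b
--             d = ['\n' + text[i]]
--         if i == len(text) - 1:
--             new += ' '.join(d) + (' _' * (b - len(d)) if len(d) < b else '')
--     return new
-- ===== SOURCE B (Python) =====
-- def fibo_poem(text: str) -> str: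
--     words = text.split()
--     sizes = []
--     a, b = 1, 1
--     total = 0
--     while total < len(words):
--         sizes.append(a)
--         total += a
--         a, b = b, a + b
--     lines = []
--     pos = 0
--     for s in sizes:
--         chunk = words[pos:pos + s]
--         pos += s
--         chunk += ['_'] * (s - len(chunk))
--         lines.append(' '.join(chunk))
--     return '\n'.join(lines)
-- ===== Notes on version B (the rewrite author's own statement) =====
-- stated objective: simpler
-- what changed: A streams words through a buffer with an in-loop flush, a last-index check inside the loop and the newline glued onto each new group's first word; B first computes the list of Fibonacci chunk sizes, then slices the word list into consecutive chunks, pads the final short chunk with underscore tokens, and joins the space-joined chunks with newlines.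
import Mathlib
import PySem

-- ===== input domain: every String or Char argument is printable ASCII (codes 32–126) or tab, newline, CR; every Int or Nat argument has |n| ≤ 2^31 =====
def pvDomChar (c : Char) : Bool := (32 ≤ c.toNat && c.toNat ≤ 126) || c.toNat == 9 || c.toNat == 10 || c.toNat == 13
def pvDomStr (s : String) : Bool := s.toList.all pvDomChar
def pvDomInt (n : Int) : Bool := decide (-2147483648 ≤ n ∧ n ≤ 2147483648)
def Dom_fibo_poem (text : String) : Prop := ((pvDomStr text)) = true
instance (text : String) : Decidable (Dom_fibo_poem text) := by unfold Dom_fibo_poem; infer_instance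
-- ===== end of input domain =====

-- B replaces A's single streaming buffer-and-flush loop by computing the Fibonacci
-- line sizes first and then slicing the word list into chunks (objective: simpler).

-- ===== PORT A =====
-- helper: Python's string repetition ' _' * k (k clamped at 0, as in Python)
def pvStrMul (s : String) : Nat → String
  | 0 => ""
  | n + 1 => s ++ pvStrMul s n

def fibo_poem (text : String) : String :=
  let ws := PySem.Str.split₀ text
  let n : Int := (ws.length : Int)
  let fin := (PySem.List.pyRange 0 n).foldl
    (fun (st : Int × Int × List String × String) (i : Int) =>
      let a := st.1
      let b := st.2.1
      let d := st.2.2.1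
      let new := st.2.2.2
      let st1 : Int × Int × List String × String :=
        if (d.length : Int) < b then
          (a, b, d ++ [PySem.List.pyGetD ws i ""], new)
        else
          (b, a + b, ["\n" ++ PySem.List.pyGetD ws i ""], new ++ PySem.Str.join " " d)
      if i = n - 1 then
        (st1.1, st1.2.1, st1.2.2.1,
          st1.2.2.2 ++ PySem.Str.join " " st1.2.2.1 ++
            (if (st1.2.2.1.length : Int) < st1.2.1 then
              pvStrMul " _" (st1.2.1 - (st1.2.2.1.length : Int)).toNat
            else ""))
      else st1)
    (0, 1, ([] : List String), "")
  fin.2.2.2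

-- ===== PORT B =====
-- helper: the while-loop collecting Fibonacci sizes; fuel (= word count) only makes it total,
-- each size is ≥ 1 so `fuel` iterations always suffice
def pvFibSizes (fuel : Nat) (total : Int) (nw : Int) (a b : Int) : List Int :=
  match fuel with
  | 0 => []
  | f + 1 => if total < nw then a :: pvFibSizes f (total + a) nw b (a + b) else []

def fibo_poem_alt (text : String) : String :=
  let words := PySem.Str.split₀ text
  let sizes := pvFibSizes words.length 0 (words.length : Int) 1 1
  let fin := sizes.foldl
    (fun (st : Int × List String) (s : Int) =>
      let chunk := PySem.List.slice words (some st.1) (some (st.1 + s))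
      let chunk := chunk ++ List.replicate (s - (chunk.length : Int)).toNat "_"
      (st.1 + s, st.2 ++ [PySem.Str.join " " chunk]))
    (0, ([] : List String))
  PySem.Str.join "\n" fin.2

-- ===== PRECONDITION & SPEC =====
def Spec_fibo_poem (text : String) (out : String) : Prop := out = fibo_poem_alt text
instance (text : String) (out : String) : Decidable (Spec_fibo_poem text out) := by unfold Spec_fibo_poem; infer_instance

-- ===== CLAIM (what is proved, stated in full; the proofs are below) =====
def Claim_equal_fibo_poem : Prop := ∀ (text : String), Dom_fibo_poem text → Spec_fibo_poem text (fibo_poem text)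

-- ===== LEMMAS AND PROOFS =====

-- A's loop step, as a named function (definitionally equal to the lambda in fibo_poem)
def pvStepA (ws : List String) (n : Int) (st : Int × Int × List String × String) (i : Int) :
    Int × Int × List String × String :=
  let a := st.1
  let b := st.2.1
  let d := st.2.2.1
  let new := st.2.2.2
  let st1 : Int × Int × List String × String :=
    if (d.length : Int) < b then
      (a, b, d ++ [PySem.List.pyGetD ws i ""], new)
    else
      (b, a + b, ["\n" ++ PySem.List.pyGetD ws i ""], new ++ PySem.Str.join " " d)
  if i = n - 1 then
    (st1.1, st1.2.1, st1.2.2.1,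
      st1.2.2.2 ++ PySem.Str.join " " st1.2.2.1 ++
        (if (st1.2.2.1.length : Int) < st1.2.1 then
          pvStrMul " _" (st1.2.1 - (st1.2.2.1.length : Int)).toNat
        else ""))
  else st1

-- A's loop as structural recursion on the remaining words (isLast = tail empty)
def pvRunA (st : Int × Int × List String × String) : List String → Int × Int × List String × String
  | [] => st
  | w :: rs =>
    let st1 : Int × Int × List String × String :=
      if ((st.2.2.1.length : Int)) < st.2.1 then
        (st.1, st.2.1, st.2.2.1 ++ [w], st.2.2.2)
      else
        (st.2.1, st.1 + st.2.1, ["\n" ++ w], st.2.2.2 ++ PySem.Str.join " " st.2.2.1)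
    let st2 : Int × Int × List String × String :=
      if rs.isEmpty then
        (st1.1, st1.2.1, st1.2.2.1,
          st1.2.2.2 ++ PySem.Str.join " " st1.2.2.1 ++
            (if (st1.2.2.1.length : Int) < st1.2.1 then
              pvStrMul " _" (st1.2.1 - (st1.2.2.1.length : Int)).toNat
            else ""))
      else st1
    pvRunA st2 rs

-- B's chunk loop, as recursion consuming the (already dropped) word list
def pvGoB : List Int → List String → List String
  | [], _ => []
  | s :: ss, ws =>
    PySem.Str.join " " (ws.take s.toNat ++ List.replicate (s.toNat - ws.length) "_") ::
      pvGoB ss (ws.drop s.toNat)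

-- B's fold step, named (definitionally equal to the lambda in fibo_poem_alt)
def pvStepB (ws : List String) (st : Int × List String) (s : Int) : Int × List String :=
  let chunk := PySem.List.slice ws (some st.1) (some (st.1 + s))
  let chunk := chunk ++ List.replicate (s - (chunk.length : Int)).toNat "_"
  (st.1 + s, st.2 ++ [PySem.Str.join " " chunk])

-- the padding string ' _'*k, on characters
def pvPadC : Nat → List Char
  | 0 => []
  | k + 1 => ' ' :: '_' :: pvPadC k

-- one poem line: s words (padded with '_' if fewer), space-joined, on characters
def pvLineOf (ws : List String) (s : Nat) : List Char :=
  PySem.Chars.join [' '] ((ws.take s ++ List.replicate (s - ws.length) "_").map String.toList)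

-- the whole poem from a nonempty word list: chunk sizes b'+1, then the pair (b'+1, a+b'+1)
def pvLinesFrom (ws : List String) (a b' : Nat) : List Char :=
  if h : ws.length ≤ b' + 1 then pvLineOf ws (b' + 1)
  else pvLineOf ws (b' + 1) ++ '\n' :: pvLinesFrom (ws.drop (b' + 1)) (b' + 1) (a + b')
termination_by ws.length
decreasing_by simp only [List.length_drop]; omega

theorem pvStrMul_toList (k : Nat) : (pvStrMul " _" k).toList = pvPadC k := by
  induction k with
  | zero => rfl
  | succ k ih => simp [pvStrMul, pvPadC, String.toList_append, ih]

theorem pvJoin_append_singleton (sep : List Char) (L : List (List Char)) (x : List Char)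
    (h : L ≠ []) : PySem.Chars.join sep (L ++ [x]) = PySem.Chars.join sep L ++ sep ++ x := by
  induction L with
  | nil => simp at h
  | cons p L ih =>
    cases L with
    | nil => simp [PySem.Chars.join_singleton, PySem.Chars.join_cons_cons]
    | cons q M =>
      have e1 : (p :: q :: M) ++ [x] = p :: q :: (M ++ [x]) := by simp
      rw [e1, PySem.Chars.join_cons_cons]
      have e2 : q :: (M ++ [x]) = (q :: M) ++ [x] := rfl
      rw [e2, ih (by simp), PySem.Chars.join_cons_cons]
      simp [List.append_assoc]

theorem pvJoin_pad (L : List (List Char)) (k : Nat) (h : L ≠ []) :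
    PySem.Chars.join [' '] (L ++ List.replicate k ['_']) =
      PySem.Chars.join [' '] L ++ pvPadC k := by
  induction k generalizing L with
  | zero => simp [pvPadC]
  | succ k ih =>
    have : L ++ List.replicate (k + 1) ['_'] = (L ++ [['_']]) ++ List.replicate k ['_'] := by
      simp [List.replicate_succ]
    rw [this, ih _ (by simp), pvJoin_append_singleton _ _ _ h]
    simp [pvPadC, List.append_assoc]

theorem pvJoin_head_append (sep x y : List Char) (rest : List (List Char)) :
    PySem.Chars.join sep ((x ++ y) :: rest) = x ++ PySem.Chars.join sep (y :: rest) := by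
  cases rest with
  | nil => simp [PySem.Chars.join_singleton]
  | cons q M => rw [PySem.Chars.join_cons_cons, PySem.Chars.join_cons_cons]; simp

theorem pvFoldA (ws : List String) : ∀ (m k : Nat) (st : Int × Int × List String × String),
    k + m = ws.length →
    ((PySem.List.pyRange (k : Int) ((ws.length : Int))).foldl (pvStepA ws (ws.length : Int)) st)
      = pvRunA st (ws.drop k) := by
  intro m
  induction m with
  | zero =>
    intro k st hk
    rw [PySem.List.pyRange_one_eq_nil (by exact_mod_cast le_of_eq hk.symm),
      List.drop_eq_nil_of_le (by omega)]
    rfl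
  | succ m ih =>
    intro k st hk
    have hklen : k < ws.length := by omega
    have hk2 : (k : Int) < (ws.length : Int) := by exact_mod_cast hklen
    rw [PySem.List.pyRange_one_cons hk2, List.foldl_cons,
      show (k : Int) + 1 = ((k + 1 : Nat) : Int) from by push_cast; ring,
      ih (k + 1) _ (by omega), List.drop_eq_getElem_cons hklen, pvRunA]
    have hget : PySem.List.pyGetD ws (k : Int) "" = ws[k] := by
      rw [PySem.List.pyGetD_eq_getElem ws "" (by omega) hk2]
      simp
    congr 1
    by_cases hm : m = 0
    · have hlast : ((k : Int) = (ws.length : Int) - 1) := by omega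
      have hemp : (ws.drop (k + 1)).isEmpty = true := by
        rw [List.isEmpty_iff]
        exact List.drop_eq_nil_of_le (by omega)
      simp only [pvStepA, hget]
      rw [if_pos hlast]
      simp [hemp]
    · have hlast : ¬((k : Int) = (ws.length : Int) - 1) := by omega
      have hemp : (ws.drop (k + 1)).isEmpty = false := by
        rw [List.isEmpty_eq_false_iff, ← List.length_pos_iff]
        simp only [List.length_drop]
        omega
      simp only [pvStepA, hget]
      rw [if_neg hlast]
      simp [hemp]


theorem pvLineOf_head (p w : String) (l : List String) (s : Nat) :
    pvLineOf ((p ++ w) :: l) (s + 1) = p.toList ++ pvLineOf (w :: l) (s + 1) := by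
  unfold pvLineOf
  rw [List.take_succ_cons, List.take_succ_cons]
  simp only [List.map_cons, List.map_append, List.length_cons, String.toList_append]
  exact pvJoin_head_append _ _ _ _

theorem pvLinesFrom_head (p w : String) (l : List String) (A B' : Nat) :
    pvLinesFrom ((p ++ w) :: l) A B' = p.toList ++ pvLinesFrom (w :: l) A B' := by
  conv_lhs => rw [pvLinesFrom]
  conv_rhs => rw [pvLinesFrom]
  simp only [List.length_cons, List.drop_succ_cons]
  split_ifs with h
  · exact pvLineOf_head p w l B'
  · rw [pvLineOf_head p w l B']
    simp [List.append_assoc]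

theorem pvRunA_eq_linesFrom : ∀ (rs : List String), rs ≠ [] →
    ∀ (a b : Int) (d : List String) (new : String), 0 ≤ a → 1 ≤ b → (d.length : Int) ≤ b →
    (pvRunA (a, b, d, new) rs).2.2.2.toList =
      new.toList ++ pvLinesFrom (d ++ rs) a.toNat (b.toNat - 1) := by
  intro rs
  induction rs with
  | nil => intro h; exact absurd rfl h
  | cons w rs ih =>
    intro _ a b d new ha hb hdb
    simp only [pvRunA]
    by_cases hrs : rs = []
    · subst hrs
      simp only [List.isEmpty_nil, if_true, pvRunA]
      by_cases hlt : (d.length : Int) < b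
      · simp only [if_pos hlt]
        conv_rhs => rw [pvLinesFrom]
        have hfit : (d ++ [w]).length ≤ b.toNat - 1 + 1 := by
          simp only [List.length_append, List.length_cons, List.length_nil]
          omega
        rw [dif_pos hfit, show b.toNat - 1 + 1 = b.toNat from by omega]
        have htk : (d ++ [w]).length ≤ b.toNat := by
          simp only [List.length_append, List.length_cons, List.length_nil]
          omega
        have hcount : b.toNat - (d ++ [w]).length = b.toNat - (d.length + 1) := by
          simp only [List.length_append, List.length_cons, List.length_nil]
        have hline : pvLineOf (d ++ [w]) b.toNat =
            PySem.Chars.join [' '] ((d ++ [w]).map String.toList) ++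
              pvPadC (b.toNat - (d.length + 1)) := by
          unfold pvLineOf
          rw [List.take_of_length_le htk, List.map_append, List.map_replicate,
            show ("_" : String).toList = ['_'] from rfl,
            pvJoin_pad _ _ (by simp), hcount]
        rw [hline, String.toList_append, String.toList_append, PySem.Str.toList_join,
          show (" " : String).toList = [' '] from rfl]
        by_cases hpad : ((((d ++ [w]).length : Nat)) : Int) < b
        · have hc2 : (b - (((d ++ [w]).length : Nat) : Int)).toNat = b.toNat - (d.length + 1) := by
            simp only [List.length_append, List.length_cons, List.length_nil]
            omega
          rw [if_pos hpad, pvStrMul_toList, hc2]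
          simp [List.append_assoc]
        · have hc3 : b.toNat - (d.length + 1) = 0 := by
            simp only [List.length_append, List.length_cons, List.length_nil] at hpad
            omega
          rw [if_neg hpad, hc3]
          simp [pvPadC]
      · simp only [if_neg hlt]
        have hde : d.length = b.toNat := by omega
        conv_rhs => rw [pvLinesFrom]
        have hnfit : ¬ (d ++ [w]).length ≤ b.toNat - 1 + 1 := by
          simp only [List.length_append, List.length_cons, List.length_nil, hde]
          omega
        rw [dif_neg hnfit, show b.toNat - 1 + 1 = b.toNat from by omega,
          show (d ++ [w]).drop b.toNat = [w] from by rw [← hde]; exact List.drop_left]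
        have hz : b.toNat - (d ++ [w]).length = 0 := by
          simp only [List.length_append, List.length_cons, List.length_nil]
          omega
        have hline : pvLineOf (d ++ [w]) b.toNat = PySem.Chars.join [' '] (d.map String.toList) := by
          unfold pvLineOf
          rw [show (d ++ [w]).take b.toNat = d from by rw [← hde]; exact List.take_left, hz]
          simp
        have hfit1 : ([w] : List String).length ≤ a.toNat + (b.toNat - 1) + 1 := by
          simp only [List.length_cons, List.length_nil]
          omega
        rw [hline, pvLinesFrom, dif_pos hfit1]
        have hline2 : pvLineOf [w] (a.toNat + (b.toNat - 1) + 1) =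
            w.toList ++ pvPadC (a.toNat + (b.toNat - 1)) := by
          unfold pvLineOf
          have htk1 : ([w] : List String).length ≤ a.toNat + (b.toNat - 1) + 1 := hfit1
          have hc4 : a.toNat + (b.toNat - 1) + 1 - ([w] : List String).length =
              a.toNat + (b.toNat - 1) := by
            simp only [List.length_cons, List.length_nil]
            omega
          rw [List.take_of_length_le htk1, List.map_append, List.map_replicate,
            show ("_" : String).toList = ['_'] from rfl,
            pvJoin_pad _ _ (by simp),
            show [w].map String.toList = [w.toList] from rfl, PySem.Chars.join_singleton, hc4]
        rw [hline2, String.toList_append, String.toList_append, String.toList_append,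
          PySem.Str.toList_join, show (" " : String).toList = [' '] from rfl]
        have hj2 : (PySem.Str.join " " ["\n" ++ w]).toList = '\n' :: w.toList := by
          rw [PySem.Str.toList_join,
            show ["\n" ++ w].map String.toList = [("\n" ++ w).toList] from rfl,
            PySem.Chars.join_singleton, String.toList_append]
          rfl
        rw [hj2]
        by_cases hpad : (((["\n" ++ w].length : Nat)) : Int) < a + b
        · have hc5 : (a + b - ((["\n" ++ w].length : Nat) : Int)).toNat =
              a.toNat + (b.toNat - 1) := by
            simp only [List.length_cons, List.length_nil]
            omega
          rw [if_pos hpad, pvStrMul_toList, hc5]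
          simp [List.append_assoc]
        · have hc6 : a.toNat + (b.toNat - 1) = 0 := by
            simp only [List.length_cons, List.length_nil] at hpad
            omega
          rw [if_neg hpad, hc6]
          simp [List.append_assoc, pvPadC]
    · have hemp : rs.isEmpty = false := by
        rw [List.isEmpty_eq_false_iff]
        exact hrs
      simp only [hemp, Bool.false_eq_true, if_false]
      by_cases hlt : (d.length : Int) < b
      · simp only [if_pos hlt]
        rw [ih hrs a b (d ++ [w]) new ha hb (by simp; omega)]
        rw [show (d ++ [w]) ++ rs = d ++ w :: rs from by simp]
      · simp only [if_neg hlt]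
        have hde : d.length = b.toNat := by omega
        rw [ih hrs b (a + b) ["\n" ++ w] (new ++ PySem.Str.join " " d) (by omega) (by omega)
          (by simp; omega)]
        rw [show (["\n" ++ w] ++ rs) = ("\n" ++ w) :: rs from rfl,
          pvLinesFrom_head "\n" w rs b.toNat ((a + b).toNat - 1)]
        conv_rhs => rw [pvLinesFrom]
        rw [dif_neg (by simp only [List.length_append, List.length_cons, hde]; omega)]
        rw [show b.toNat - 1 + 1 = b.toNat from by omega]
        rw [show (d ++ w :: rs).drop b.toNat = w :: rs from by rw [← hde]; exact List.drop_left]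
        have hline : pvLineOf (d ++ w :: rs) b.toNat = PySem.Chars.join [' '] (d.map String.toList) := by
          unfold pvLineOf
          rw [show (d ++ w :: rs).take b.toNat = d from by rw [← hde]; exact List.take_left]
          have hz : b.toNat - (d ++ w :: rs).length = 0 := by
            simp only [List.length_append, List.length_cons]
            omega
          rw [hz]
          simp
        rw [hline, String.toList_append, PySem.Str.toList_join,
          show (" " : String).toList = [' '] from rfl,
          show (a + b).toNat - 1 = a.toNat + (b.toNat - 1) from by omega,
          show ("\n" : String).toList = ['\n'] from rfl]
        simp [List.append_assoc]


theorem pvFibSizes_pos : ∀ (fuel : Nat) (t nw a b : Int), 1 ≤ a → 1 ≤ b →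
    ∀ s ∈ pvFibSizes fuel t nw a b, 1 ≤ s := by
  intro fuel
  induction fuel with
  | zero => intro t nw a b ha hb s hs; simp [pvFibSizes] at hs
  | succ f ih =>
    intro t nw a b ha hb s hs
    simp only [pvFibSizes] at hs
    split_ifs at hs with h
    · rcases List.mem_cons.mp hs with h1 | h1
      · subst h1; exact ha
      · exact ih _ _ _ _ hb (by omega) s h1
    · simp at hs

theorem pvFibSizes_shift : ∀ (fuel : Nat) (t nw a b : Int),
    pvFibSizes fuel t nw a b = pvFibSizes fuel 0 (nw - t) a b := by
  intro fuel
  induction fuel with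
  | zero => intro t nw a b; rfl
  | succ f ih =>
    intro t nw a b
    simp only [pvFibSizes]
    by_cases h : t < nw
    · rw [if_pos h, if_pos (by omega), ih (t + a), ih (0 + a)]
      have e : nw - (t + a) = nw - t - (0 + a) := by ring
      rw [e]
    · rw [if_neg h, if_neg (by omega)]

theorem pvFoldB (ws : List String) : ∀ (sizes : List Int), (∀ s ∈ sizes, 1 ≤ s) →
    ∀ (pos : Int), 0 ≤ pos → ∀ (acc : List String),
    (sizes.foldl (pvStepB ws) (pos, acc)).2 = acc ++ pvGoB sizes (ws.drop pos.toNat) := by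
  intro sizes
  induction sizes with
  | nil => intro _ pos _ acc; simp [pvGoB]
  | cons s ss ih =>
    intro hp pos h0 acc
    have hs : 1 ≤ s := hp s (by simp)
    have hstep : pvStepB ws (pos, acc) s =
        (pos + s, acc ++ [PySem.Str.join " " ((ws.drop pos.toNat).take s.toNat ++
          List.replicate (s.toNat - (ws.drop pos.toNat).length) "_")]) := by
      have e1 : PySem.List.slice ws (some pos) (some (pos + s)) =
          (ws.drop pos.toNat).take s.toNat := by
        have h1 : pos = ((pos.toNat : Nat) : Int) := by omega
        have h2 : pos + s = (((pos.toNat + s.toNat : Nat)) : Int) := by push_cast; omega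
        conv_lhs => rw [h2, h1]
        rw [PySem.List.slice_natCast]
        simp only [Int.toNat_natCast]
        congr 1
        omega
      have e2 : (s - ((((ws.drop pos.toNat).take s.toNat).length : Nat) : Int)).toNat =
          s.toNat - (ws.drop pos.toNat).length := by
        simp only [List.length_take]
        omega
      show (pos + s, acc ++ [PySem.Str.join " " (PySem.List.slice ws (some pos) (some (pos + s)) ++
        List.replicate ((s - (((PySem.List.slice ws (some pos) (some (pos + s))).length : Nat) : Int)).toNat) "_")]) = _
      rw [e1, e2]
    rw [List.foldl_cons, hstep, ih (fun x hx => hp x (by simp [hx])) (pos + s) (by omega)]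
    have e3 : ws.drop (pos + s).toNat = (ws.drop pos.toNat).drop s.toNat := by
      rw [List.drop_drop]
      congr 1
      omega
    rw [e3, pvGoB]
    simp

theorem pvFibSizes_nil (fuel : Nat) (rem a b : Int) (h : rem ≤ 0) :
    pvFibSizes fuel 0 rem a b = [] := by
  cases fuel with
  | zero => rfl
  | succ f => simp only [pvFibSizes]; rw [if_neg (by omega)]

theorem pvJoinNL (x : String) (ls : List String) (h : ls ≠ []) :
    (PySem.Str.join "\n" (x :: ls)).toList =
      x.toList ++ '\n' :: (PySem.Str.join "\n" ls).toList := by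
  cases ls with
  | nil => exact absurd rfl h
  | cons y M =>
    rw [PySem.Str.toList_join, PySem.Str.toList_join]
    simp only [List.map_cons]
    rw [PySem.Chars.join_cons_cons]
    simp

theorem pvJoin_single_toList (x : String) : (PySem.Str.join "\n" [x]).toList = x.toList := by
  rw [PySem.Str.toList_join]
  simp [PySem.Chars.join_singleton]

theorem pvLineOf_toList (ws : List String) (s : Nat) :
    (PySem.Str.join " " (ws.take s ++ List.replicate (s - ws.length) "_")).toList =
      pvLineOf ws s := by
  rw [PySem.Str.toList_join]
  rfl

theorem pvGoB_fib : ∀ (fuel : Nat) (rs : List String) (a b : Int), rs ≠ [] →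
    rs.length ≤ fuel → 1 ≤ a → a ≤ b →
    (PySem.Str.join "\n" (pvGoB (pvFibSizes fuel 0 (rs.length : Int) a b) rs)).toList =
      pvLinesFrom rs (b - a).toNat (a.toNat - 1) := by
  intro fuel
  induction fuel with
  | zero =>
    intro rs a b hne hlen _ _
    cases rs with
    | nil => exact absurd rfl hne
    | cons x M => simp at hlen
  | succ f ih =>
    intro rs a b hne hlen ha hab
    have hlen0 : 0 < rs.length := List.length_pos_iff.mpr hne
    simp only [pvFibSizes]
    rw [if_pos (by exact_mod_cast hlen0), pvFibSizes_shift f (0 + a) (rs.length : Int) b (a + b),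
      show (rs.length : Int) - (0 + a) = (rs.length : Int) - a from by ring]
    by_cases hfit : (rs.length : Int) ≤ a
    · rw [pvFibSizes_nil f _ _ _ (by omega), pvGoB, pvGoB, pvJoin_single_toList,
        pvLineOf_toList, pvLinesFrom, dif_pos (by omega)]
      congr 1
      omega
    · have hf : 1 ≤ f := by omega
      have hcons : pvFibSizes f 0 ((rs.length : Int) - a) b (a + b) ≠ [] := by
        cases f with
        | zero => omega
        | succ f' =>
          simp only [pvFibSizes]
          rw [if_pos (by omega)]
          simp
      have hgo : pvGoB (pvFibSizes f 0 ((rs.length : Int) - a) b (a + b)) (rs.drop a.toNat) ≠ [] := by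
        rcases hx : pvFibSizes f 0 ((rs.length : Int) - a) b (a + b) with _ | ⟨s0, ss0⟩
        · exact absurd hx hcons
        · simp [pvGoB]
      rw [pvGoB, pvJoinNL _ _ hgo, pvLineOf_toList]
      have hdrop_ne : rs.drop a.toNat ≠ [] := by
        rw [← List.length_pos_iff]
        simp only [List.length_drop]
        omega
      have hih := ih (rs.drop a.toNat) b (a + b) hdrop_ne
        (by simp only [List.length_drop]; omega) (by omega) (by omega)
      rw [show (((rs.drop a.toNat).length : Nat) : Int) = (rs.length : Int) - a from by
        simp only [List.length_drop]; omega] at hih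
      rw [hih]
      conv_rhs => rw [pvLinesFrom]
      rw [dif_neg (by omega)]
      rw [show (a + b - b).toNat = a.toNat from by omega,
        show a.toNat - 1 + 1 = a.toNat from by omega,
        show (b - a).toNat + (a.toNat - 1) = b.toNat - 1 from by omega]


theorem portA_eq (text : String) :
    fibo_poem text = (pvRunA (0, 1, [], "") (PySem.Str.split₀ text)).2.2.2 := by
  have h0 : fibo_poem text =
      ((PySem.List.pyRange (((0 : Nat) : Int)) (((PySem.Str.split₀ text).length : Int))).foldl
        (pvStepA (PySem.Str.split₀ text) ((PySem.Str.split₀ text).length : Int))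
        (0, 1, [], "")).2.2.2 := rfl
  rw [h0, pvFoldA (PySem.Str.split₀ text) (PySem.Str.split₀ text).length 0 _ (by omega),
    List.drop_zero]

theorem portB_eq (text : String) :
    fibo_poem_alt text =
      PySem.Str.join "\n"
        (pvGoB (pvFibSizes (PySem.Str.split₀ text).length 0 ((PySem.Str.split₀ text).length : Int) 1 1)
          (PySem.Str.split₀ text)) := by
  have h0 : fibo_poem_alt text = PySem.Str.join "\n"
      (((pvFibSizes (PySem.Str.split₀ text).length 0 ((PySem.Str.split₀ text).length : Int) 1 1).foldl
        (pvStepB (PySem.Str.split₀ text)) (0, [])).2) := rfl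
  rw [h0, pvFoldB (PySem.Str.split₀ text) _
    (pvFibSizes_pos _ _ _ _ _ le_rfl le_rfl) 0 le_rfl []]
  simp

-- ===== VERDICT (by name: the statement is the Claim_ definition above) =====
theorem fibo_poem_spec : Claim_equal_fibo_poem := by
  intro text _
  unfold Spec_fibo_poem
  rw [portA_eq, portB_eq]
  rcases eq_or_ne (PySem.Str.split₀ text) [] with h | h
  · rw [h]; rfl
  · rw [← String.toList_inj]
    rw [pvRunA_eq_linesFrom (PySem.Str.split₀ text) h 0 1 [] "" (by norm_num) (by norm_num)
        (by simp)]
    rw [pvGoB_fib (PySem.Str.split₀ text).length (PySem.Str.split₀ text) 1 1 h le_rfl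
        (by norm_num) le_rfl]
    rfl
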